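-- pv_equiv track=rewrite | github.com/EduardAliaga/EEG_Generation | src/data/get_raw_data.py | separate_inquiries
-- ===== SOURCE A (Python) =====
-- def separate_inquiries(triggers):
--     """Separate the triggers into inquiries based on 'fixation' events."""
--     inquiries = []
--     current_inquiry = []
--     for event in triggers:
--         if event[1] == 'fixation':
--             if current_inquiry:
--                 inquiries.append(current_inquiry)
--             current_inquiry = []
--         current_inquiry.append(event)
--     if current_inquiry:
--         inquiries.append(current_inquiry)
--     return inquiries
-- ===== SOURCE B (Python) =====
-- def separate_inquiries(triggers):
--     """Separate the triggers into inquiries based on 'fixation' events."""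
--     n = len(triggers)
--     starts = [i for i in range(n) if i == 0 or triggers[i][1] == 'fixation']
--     return [triggers[a:b] for a, b in zip(starts, starts[1:] + [n])]
-- ===== Notes on version B (the rewrite author's own statement) =====
-- stated objective: alternative
-- what changed: B first builds an index table of group-start positions (index 0 and every 'fixation' index) in one pass, then materialises the groups by zipping consecutive start indices and slicing, instead of A's element-wise accumulation with a flush-on-fixation state machine.
import Mathlib
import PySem

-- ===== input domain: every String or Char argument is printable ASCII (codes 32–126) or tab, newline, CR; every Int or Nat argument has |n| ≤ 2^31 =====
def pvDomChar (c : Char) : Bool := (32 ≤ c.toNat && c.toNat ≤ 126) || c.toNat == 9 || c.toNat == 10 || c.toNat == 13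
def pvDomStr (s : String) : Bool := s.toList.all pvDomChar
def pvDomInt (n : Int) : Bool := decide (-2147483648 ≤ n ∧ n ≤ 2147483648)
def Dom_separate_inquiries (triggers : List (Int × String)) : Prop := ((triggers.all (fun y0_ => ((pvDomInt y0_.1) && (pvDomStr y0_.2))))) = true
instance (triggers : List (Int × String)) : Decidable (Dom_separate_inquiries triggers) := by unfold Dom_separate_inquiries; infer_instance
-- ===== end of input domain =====

-- B builds an index table of group starts (index 0 and every 'fixation' index) and slices the
-- list between consecutive starts, instead of A's flush-on-fixation accumulator scan (alternative).


-- ===== PORT A =====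
-- A's loop: state (inquiries, current_inquiry); on a 'fixation', flush current_inquiry
-- (if nonempty) and start afresh; every event is appended to current_inquiry.
def sepStepA (st : List (List (Int × String)) × List (Int × String)) (event : Int × String) :
    List (List (Int × String)) × List (Int × String) :=
  let st' := if event.2 = "fixation" then
               ((if st.2 = [] then st.1 else st.1 ++ [st.2]), ([] : List (Int × String)))
             else st
  (st'.1, st'.2 ++ [event])

def separate_inquiries (triggers : List (Int × String)) : List (List (Int × String)) :=
  let s := triggers.foldl sepStepA ([], [])
  if s.2 = [] then s.1 else s.1 ++ [s.2]

-- ===== PORT B =====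
-- B: `starts` = [i for i in range(n) if i == 0 or triggers[i][1] == 'fixation'];
-- then one slice triggers[a:b] per consecutive pair of zip(starts, starts[1:] + [n]).
-- Every index i is in range and a ≤ b ≤ n, so triggers[i] is getD and the slice is drop/take (exact here).
def separate_inquiries_alt (triggers : List (Int × String)) : List (List (Int × String)) :=
  let n := triggers.length
  let starts := (List.range n).filter
    (fun i => i == 0 || (triggers.getD i default).2 == "fixation")
  (List.zip starts (starts.tail ++ [n])).map
    (fun ab => (triggers.drop ab.1).take (ab.2 - ab.1))

-- ===== PRECONDITION & SPEC =====
def Spec_separate_inquiries (triggers : List (Int × String)) (out : List (List (Int × String))) : Prop := out = separate_inquiries_alt triggers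
instance (triggers : List (Int × String)) (out : List (List (Int × String))) : Decidable (Spec_separate_inquiries triggers out) := by unfold Spec_separate_inquiries; infer_instance

-- ===== CLAIM (what is proved, stated in full; the proofs are below) =====
def Claim_equal_separate_inquiries : Prop := ∀ (triggers : List (Int × String)), Dom_separate_inquiries triggers → Spec_separate_inquiries triggers (separate_inquiries triggers)

-- ===== LEMMAS AND PROOFS =====

-- canonical span-based characterisation of the grouping
def pvGroups : List (Int × String) → List (List (Int × String))
  | [] => []
  | e :: rest =>
      (e :: rest.takeWhile (fun x => x.2 ≠ "fixation")) ::
        pvGroups (rest.dropWhile (fun x => x.2 ≠ "fixation"))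
termination_by l => l.length
decreasing_by
  simpa using Nat.lt_succ_of_le (List.length_dropWhile_le _ _)

theorem pvGroups_nil : pvGroups [] = [] := by rw [pvGroups.eq_def]

theorem pvGroups_cons (e : Int × String) (rest : List (Int × String)) :
    pvGroups (e :: rest) =
      (e :: rest.takeWhile (fun x => x.2 ≠ "fixation")) ::
        pvGroups (rest.dropWhile (fun x => x.2 ≠ "fixation")) := by
  rw [pvGroups.eq_def]

-- A-side: the fold from a nonempty current group consumes the run of non-fixations into it
theorem sepFoldA_consume (ts : List (Int × String))
    (inqs : List (List (Int × String))) (cur : List (Int × String)) (hcur : cur ≠ []) :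
    (let s := ts.foldl sepStepA (inqs, cur); if s.2 = [] then s.1 else s.1 ++ [s.2]) =
      inqs ++ (cur ++ ts.takeWhile (fun x => x.2 ≠ "fixation")) ::
        pvGroups (ts.dropWhile (fun x => x.2 ≠ "fixation")) := by
  induction ts generalizing inqs cur with
  | nil => simp [hcur, pvGroups_nil]
  | cons e ts ih =>
    by_cases hf : e.2 = "fixation"
    · simp only [List.foldl_cons, sepStepA, hf, if_pos, hcur, ite_false, List.nil_append]
      rw [ih (inqs ++ [cur]) [e] (by simp)]
      simp only [List.takeWhile_cons, List.dropWhile_cons, hf, ne_eq, not_true_eq_false,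
        decide_false, Bool.false_eq_true, if_false]
      rw [pvGroups_cons]
      simp
    · simp only [List.foldl_cons, sepStepA, hf, ite_false]
      rw [ih inqs (cur ++ [e]) (by simp)]
      simp [hf, List.append_assoc]

theorem sepA_eq_groups (ts : List (Int × String)) :
    separate_inquiries ts = pvGroups ts := by
  cases ts with
  | nil => simp [separate_inquiries, pvGroups]
  | cons e rest =>
    have h1 : sepStepA ([], []) e = ([], [e]) := by
      simp [sepStepA]
    unfold separate_inquiries
    simp only [List.foldl_cons, h1]
    rw [sepFoldA_consume rest [] [e] (by simp)]
    rw [pvGroups_cons]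
    simp

-- B-side helpers -----------------------------------------------------------

-- shorthand for B's start-index table
def pvStarts (ts : List (Int × String)) : List Nat :=
  (List.range ts.length).filter
    (fun i => i == 0 || (ts.getD i default).2 == "fixation")

theorem sepAlt_eq_starts (ts : List (Int × String)) :
    separate_inquiries_alt ts =
      (List.zip (pvStarts ts) ((pvStarts ts).tail ++ [ts.length])).map
        (fun ab => (ts.drop ab.1).take (ab.2 - ab.1)) := rfl

-- fixation-index table of a list
def pvFixIdx (r : List (Int × String)) : List Nat :=
  (List.range r.length).filter (fun j => (r.getD j default).2 == "fixation")

-- filter of a shifted range: indices beyond a prefix of length m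
theorem starts_append (u v : List (Int × String)) (hu : u ≠ []) :
    pvStarts (u ++ v) =
      (List.range u.length).filter
          (fun i => i == 0 || ((u ++ v).getD i default).2 == "fixation")
        ++ (pvFixIdx v).map (u.length + ·) := by
  unfold pvStarts pvFixIdx
  rw [List.length_append, List.range_add, List.filter_append, List.filter_map]
  congr 1
  apply congrArg
  apply List.filter_congr
  intro j hj
  have hj' : j < v.length := by simpa using hj
  have hlen : 0 < u.length := List.length_pos_of_ne_nil hu
  have hidx : (u ++ v)[u.length + j]? = v[j]? := by
    rw [List.getElem?_append_right (Nat.le_add_right _ _)]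
    simp
  have hpos : 0 < u.length + j := Nat.lt_of_lt_of_le hlen (Nat.le_add_right _ _)
  have hz : (u.length + j == 0) = false := by
    simpa using Nat.pos_iff_ne_zero.mp hpos
  simp [Function.comp, List.getD, hidx, hz]

-- in the head segment e :: h of non-fixations, index 0 is the only start
theorem starts_head (e : Int × String) (h v : List (Int × String))
    (hh : ∀ x ∈ h, x.2 ≠ "fixation") :
    (List.range (e :: h).length).filter
        (fun i => i == 0 || (((e :: h) ++ v).getD i default).2 == "fixation") = [0] := by
  rw [show (e :: h).length = h.length + 1 from rfl, List.range_succ_eq_map, List.filter_cons]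
  have h0 : (((0:Nat) == 0) || (((e :: h) ++ v).getD 0 default).2 == "fixation") = true := by simp
  rw [if_pos h0, List.filter_map]
  have : (List.range h.length).filter
      ((fun i => i == 0 || (((e :: h) ++ v).getD i default).2 == "fixation") ∘ Nat.succ) = [] := by
    rw [List.filter_eq_nil_iff]
    intro j hj
    have hj' : j < h.length := by simpa using hj
    have hidx : ((e :: h) ++ v).getD (j + 1) default = (h ++ v).getD j default := by
      simp [List.getD]
    have hget : (h ++ v)[j]? = some h[j] := by
      rw [List.getElem?_append_left hj']
      simp
    have hx : h[j].2 ≠ "fixation" := hh _ (List.getElem_mem hj')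
    simp [Function.comp, List.getD, hget, hx]
  rw [this]
  rfl

-- for a list whose head (if any) is a fixation, the start table is the fixation table
theorem fixIdx_eq_starts (r : List (Int × String))
    (hfix : r ≠ [] → ((r.getD 0 default).2) = "fixation") :
    pvFixIdx r = pvStarts r := by
  unfold pvFixIdx pvStarts
  apply List.filter_congr
  intro j hj
  have hjl : j < r.length := by simpa using hj
  cases j with
  | zero =>
    have hne : r ≠ [] := by intro hc; simp [hc] at hjl
    have := hfix hne
    simp only [List.getD] at this
    simp [this]
  | succ k => simp

-- dropWhile (not fixation) yields [] or a list headed by a fixation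
theorem dropWhile_head_fix (l : List (Int × String))
    (h : l.dropWhile (fun x => decide (x.2 ≠ "fixation")) ≠ []) :
    ((l.dropWhile (fun x => decide (x.2 ≠ "fixation"))).getD 0 default).2 = "fixation" := by
  induction l with
  | nil => simp at h
  | cons a l ih =>
    by_cases ha : a.2 = "fixation"
    · simp [ha, List.getD]
    · simp only [List.dropWhile_cons, ha, ne_eq, not_false_eq_true, decide_true, if_true] at h ⊢
      exact ih h

-- the start table of a nonempty list begins with 0
theorem starts_cons (a : Int × String) (r' : List (Int × String)) :
    pvStarts (a :: r') = 0 ::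
      ((List.range r'.length).map Nat.succ).filter
        (fun i => i == 0 || ((a :: r').getD i default).2 == "fixation") := by
  unfold pvStarts
  rw [show (a :: r').length = r'.length + 1 from rfl, List.range_succ_eq_map, List.filter_cons]
  simp

-- splitting off the first group: B on (e :: h) ++ r is (e :: h) followed by B on r
theorem sepAlt_split (e : Int × String) (h r : List (Int × String))
    (hmem : ∀ x ∈ h, x.2 ≠ "fixation")
    (hfix : r ≠ [] → ((r.getD 0 default).2) = "fixation") :
    separate_inquiries_alt ((e :: h) ++ r) = (e :: h) :: separate_inquiries_alt r := by
  rw [sepAlt_eq_starts, sepAlt_eq_starts,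
    starts_append (e :: h) r (by simp), starts_head e h r hmem, fixIdx_eq_starts r hfix]
  cases r with
  | nil => simp [pvStarts]
  | cons a r' =>
    rw [starts_cons a r']
    generalize ((List.range r'.length).map Nat.succ).filter
        (fun i => i == 0 || ((a :: r').getD i default).2 == "fixation") = T
    have hn : ((e :: h) ++ a :: r').length = (e :: h).length + (a :: r').length := by
      simp
      omega
    rw [hn]
    simp only [List.map_cons, List.cons_append, List.nil_append, List.tail_cons, List.zip_cons_cons,
      List.map]
    congr 1
    case _ =>
      -- the first slice is the whole head segment
      simp only [Nat.sub_zero, Nat.add_zero, List.drop_zero]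
      exact List.take_left
    case _ =>
      -- the remaining slices are the slices of r, shifted by the head length
      have hmapn : (T.map ((e :: h).length + ·)) ++ [(e :: h).length + (a :: r').length] =
          (T ++ [(a :: r').length]).map ((e :: h).length + ·) := by
        simp
      rw [hmapn, show ((e :: h).length + 0) = (fun x => (e :: h).length + x) 0 from rfl,
        ← List.map_cons, List.zip_map, List.map_map]
      apply List.map_congr_left
      intro ab _
      have hd : List.drop (h.length + 1 + ab.1) (e :: (h ++ a :: r')) = List.drop ab.1 (a :: r') := by
        rw [show e :: (h ++ a :: r') = (e :: h) ++ (a :: r') from rfl,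
          show h.length + 1 + ab.1 = (e :: h).length + ab.1 from rfl, List.drop_append]
        simp
      simp [Prod.map, hd, Nat.add_sub_add_left]

-- B satisfies pvGroups' recurrence
theorem sepAlt_unroll (e : Int × String) (rest : List (Int × String)) :
    separate_inquiries_alt (e :: rest) =
      (e :: rest.takeWhile (fun x => x.2 ≠ "fixation")) ::
        separate_inquiries_alt (rest.dropWhile (fun x => x.2 ≠ "fixation")) := by
  have hsplit : e :: rest =
      (e :: rest.takeWhile (fun x => decide (x.2 ≠ "fixation"))) ++
        rest.dropWhile (fun x => decide (x.2 ≠ "fixation")) := by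
    simp [List.takeWhile_append_dropWhile]
  rw [hsplit]
  exact sepAlt_split e _ _
    (fun x hx => by simpa using List.mem_takeWhile_imp hx)
    (fun hne => dropWhile_head_fix rest hne)

theorem sepAlt_eq_groups (ts : List (Int × String)) :
    separate_inquiries_alt ts = pvGroups ts := by
  induction ts using pvGroups.induct with
  | case1 => simp [separate_inquiries_alt, pvGroups_nil]
  | case2 e rest ih =>
    rw [sepAlt_unroll, pvGroups_cons, ih]

-- ===== VERDICT (by name: the statement is the Claim_ definition above) =====
theorem separate_inquiries_spec : Claim_equal_separate_inquiries := by
  intro triggers _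
  unfold Spec_separate_inquiries
  rw [sepA_eq_groups, sepAlt_eq_groups]
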